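-- pv_equiv track=rewrite | github.com/wtf-sonii/CPS109_labs | labs109.py | reverse_ascending_sublists
-- ===== SOURCE A (Python) =====
-- def reverse_ascending_sublists(items):
--     ans = []
--     sublst = []
--     for item in items:
--         if len(sublst) == 0:
--             sublst.append(item)
--         else:
--             if item > sublst[0]:
--                 sublst.insert(0, item)
--             else:
--                 ans.extend(sublst)
--                 sublst = [item]
--     ans.extend(sublst)
--     return ans
-- ===== SOURCE B (Python) =====
-- def reverse_ascending_sublists(items):
--     out = []
--     n = len(items)
--     i = 0
--     while i < n:
--         j = i + 1
--         while j < n and items[j] > items[j - 1]: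
--             j += 1
--         out.extend(items[i:j][::-1])
--         i = j
--     return out
-- ===== Notes on version B (the rewrite author's own statement) =====
-- stated objective: alternative
-- what changed: B scans with two indices, finds the end of each maximal strictly ascending run and appends the reversed slice directly to the output, instead of A's maintaining a run buffer via list.insert(0, item) that it flushes on each break.
import Mathlib
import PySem

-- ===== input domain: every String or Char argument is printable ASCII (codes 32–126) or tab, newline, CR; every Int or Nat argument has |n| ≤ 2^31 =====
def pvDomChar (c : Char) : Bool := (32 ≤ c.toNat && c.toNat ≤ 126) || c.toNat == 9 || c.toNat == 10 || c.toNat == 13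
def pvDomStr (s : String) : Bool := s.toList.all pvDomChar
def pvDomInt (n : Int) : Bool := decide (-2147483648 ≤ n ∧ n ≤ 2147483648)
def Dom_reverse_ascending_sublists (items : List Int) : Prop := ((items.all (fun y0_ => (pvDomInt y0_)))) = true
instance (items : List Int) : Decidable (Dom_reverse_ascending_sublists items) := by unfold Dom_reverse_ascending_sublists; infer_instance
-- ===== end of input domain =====

-- B finds each maximal ascending run by a two-index scan and appends the reversed
-- slice to the output, instead of A's run buffer built with list.insert(0, item).

-- ===== PORT A =====
-- A's loop body; sublst[0] is read only in the branch where sublst is nonempty, so headD 0 is exact.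
def rasStepA (st : List Int × List Int) (item : Int) : List Int × List Int :=
  if st.2.length = 0 then (st.1, st.2 ++ [item])
  else if item > st.2.headD 0 then (st.1, item :: st.2)
  else (st.1 ++ st.2, [item])

def reverse_ascending_sublists (items : List Int) : List Int :=
  let s := items.foldl rasStepA ([], [])
  s.1 ++ s.2

-- ===== PORT B =====
-- B's inner while loop: how far j advances past prev (while items[j] > items[j-1]).
def rasRun (prev : Int) : List Int → Nat
  | [] => 0
  | y :: ys => if y > prev then rasRun y ys + 1 else 0

-- B's outer while loop as recursion on the remaining suffix items[i:];
-- items[i:j][::-1] is (take (k+1)).reverse and i := j is drop.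
def reverse_ascending_sublists_alt : List Int → List Int
  | [] => []
  | x :: xs =>
    ((x :: xs).take (rasRun x xs + 1)).reverse
      ++ reverse_ascending_sublists_alt (xs.drop (rasRun x xs))
termination_by l => l.length
decreasing_by simp [List.length_drop]

-- ===== PRECONDITION & SPEC =====
def Spec_reverse_ascending_sublists (items : List Int) (out : List Int) : Prop := out = reverse_ascending_sublists_alt items
instance (items : List Int) (out : List Int) : Decidable (Spec_reverse_ascending_sublists items out) := by unfold Spec_reverse_ascending_sublists; infer_instance

-- ===== CLAIM (what is proved, stated in full; the proofs are below) =====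
def Claim_equal_reverse_ascending_sublists : Prop := ∀ (items : List Int), Dom_reverse_ascending_sublists items → Spec_reverse_ascending_sublists items (reverse_ascending_sublists items)

-- ===== LEMMAS AND PROOFS =====

theorem alt_nil : reverse_ascending_sublists_alt [] = [] := by
  rw [reverse_ascending_sublists_alt.eq_1]

theorem alt_cons (x : Int) (xs : List Int) :
    reverse_ascending_sublists_alt (x :: xs)
      = (xs.take (rasRun x xs)).reverse ++ [x]
        ++ reverse_ascending_sublists_alt (xs.drop (rasRun x xs)) := by
  rw [reverse_ascending_sublists_alt.eq_2]
  simp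

theorem stepA_gt (ans r : List Int) (a y : Int) (h : y > a) :
    rasStepA (ans, a :: r) y = (ans, y :: a :: r) := by
  simp [rasStepA, h]

theorem stepA_le (ans r : List Int) (a y : Int) (h : ¬ y > a) :
    rasStepA (ans, a :: r) y = (ans ++ (a :: r), [y]) := by
  simp [rasStepA, h]

-- Invariant: running A's fold with accumulated answer ans and nonempty run a :: r
-- (head = most recent element) extends the run by the ascending continuation of
-- length rasRun a xs, flushes it, and then behaves like B on the remaining suffix.
theorem ras_foldA (xs : List Int) : ∀ (ans r : List Int) (a : Int),
    (xs.foldl rasStepA (ans, a :: r)).1 ++ (xs.foldl rasStepA (ans, a :: r)).2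
    = ans ++ (xs.take (rasRun a xs)).reverse ++ (a :: r)
        ++ reverse_ascending_sublists_alt (xs.drop (rasRun a xs)) := by
  induction xs with
  | nil => intro ans r a; simp [rasRun, alt_nil]
  | cons y ys ih =>
    intro ans r a
    by_cases hy : y > a
    · rw [List.foldl_cons, stepA_gt ans r a y hy, ih]
      simp [rasRun, hy]
    · rw [List.foldl_cons, stepA_le ans r a y hy, ih]
      simp [rasRun, hy, alt_cons]

-- ===== VERDICT (by name: the statement is the Claim_ definition above) =====
theorem reverse_ascending_sublists_spec : Claim_equal_reverse_ascending_sublists := by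
  intro items _
  unfold Spec_reverse_ascending_sublists reverse_ascending_sublists
  cases items with
  | nil => simp [alt_nil]
  | cons x xs =>
    have h0 : rasStepA ([], []) x = ([], [x]) := by simp [rasStepA]
    simp only [List.foldl_cons, h0]
    rw [ras_foldA xs [] [] x, alt_cons]
    simp
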